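-- pv_equiv track=rewrite | github.com/Ourumo/BaekjoonHub | 프로그래머스/1/172928. 공원 산책/공원 산책.py | solution
-- ===== SOURCE A (Python) =====
-- def solution(park, routes):
--     new_park = []
--     crt_pos_r, crt_pos_c = -1, -1
--
--     for i in range(len(park)):
--         if "S" in park[i]:
--             crt_pos_r = i
--             crt_pos_c = park[i].find("S")
--
--         temp_arr = list(map(str, park[i]))
--         new_park.append(temp_arr)
--
--     rows_size = len(new_park)
--     cols_size = len(new_park[0])
--
--     for r in routes:
--         location, distance = map(str, r.split(" "))
--         moves = [0, 0]
--
--         # east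
--         if location == "E":
--             moves = [0, int(distance)]
--         # west
--         elif location == "W":
--             moves = [0, -int(distance)]
--         # north
--         elif location == "S":
--             moves = [int(distance), 0]
--         # south
--         elif location == "N":
--             moves = [-int(distance), 0]
--
--         tmp_r = crt_pos_r + moves[0]
--         tmp_c = crt_pos_c + moves[1]
--
--         if not (0 <= tmp_r < rows_size and 0 <= tmp_c < cols_size):
--             continue
--
--         if crt_pos_r == tmp_r:
--             if not park[crt_pos_r].find("X", min(crt_pos_c, tmp_c), max(crt_pos_c, tmp_c) + 1) == -1:
--                 continue
--             crt_pos_r = tmp_r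
--             crt_pos_c = tmp_c
--         else:
--             temp = True
--             for j in range(min(crt_pos_r, tmp_r), max(crt_pos_r, tmp_r) + 1):
--                 if new_park[j][crt_pos_c] == "X":
--                     temp = False
--                     break
--             if temp:
--                 crt_pos_r = tmp_r
--                 crt_pos_c = tmp_c
--     return [crt_pos_r, crt_pos_c]
-- ===== SOURCE B (Python) =====
-- def solution(park, routes):
--     rows, cols = len(park), len(park[0])
--     r, c = -1, -1
--     for i, row in enumerate(park):
--         c0 = row.find("S")
--         if c0 != -1:
--             r, c = i, c0
--
--     DIRS = {"E": (0, 1), "W": (0, -1), "S": (1, 0), "N": (-1, 0)}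
--     for route in routes:
--         d, n = route.split(" ")
--         if d not in DIRS:
--             continue
--         dr, dc = DIRS[d]
--         rr, cc = r, c
--         for _ in range(int(n)):
--             rr += dr
--             cc += dc
--             if not (0 <= rr < rows and 0 <= cc < cols) or park[rr][cc] == "X":
--                 break
--         else:
--             r, c = rr, cc
--     return [r, c]
-- ===== Notes on version B (the rewrite author's own statement) =====
-- stated objective: alternative
-- what changed: B simulates each route cell by cell with an all-or-nothing candidate walk (direction table + for/else) instead of A's grid copy and per-axis find/flag-loop segment scans; Pre_ excludes inputs where A raises (empty park, malformed routes, non-int distances) plus ragged parks with actually-moving routes and negative distances, where A's row-0 column bound and backwards arithmetic are accidental and B raises or stays put.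
-- outside the precondition, e.g. on solution(['SO', 'O'], ['S 1', 'E 1']): A returns [1, 1], B raises IndexError; on solution(['OS'], ['E -1']): A returns [0, 0], B returns [0, 1]
import Mathlib
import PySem

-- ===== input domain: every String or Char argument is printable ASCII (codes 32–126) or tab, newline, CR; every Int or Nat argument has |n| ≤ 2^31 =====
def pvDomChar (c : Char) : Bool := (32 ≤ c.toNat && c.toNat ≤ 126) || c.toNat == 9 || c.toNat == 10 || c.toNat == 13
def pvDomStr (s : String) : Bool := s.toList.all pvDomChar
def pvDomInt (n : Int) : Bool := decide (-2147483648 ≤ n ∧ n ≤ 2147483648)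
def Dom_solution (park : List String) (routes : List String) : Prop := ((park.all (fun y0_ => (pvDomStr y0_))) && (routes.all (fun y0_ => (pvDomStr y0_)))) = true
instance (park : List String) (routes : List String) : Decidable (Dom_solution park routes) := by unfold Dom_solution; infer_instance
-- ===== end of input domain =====

-- B simulates each route cell by cell with an all-or-nothing candidate walk instead of A's
-- grid copy and per-axis find/flag-loop segment scans; Pre_ excludes inputs where A raises,
-- ragged parks on which some route actually moves, and negative distances.

-- ===== PORT A =====
-- first loop of A: update (crt_pos_r, crt_pos_c) when the row contains 'S', then append list(map(str, row))
def solutionRowScan (park : List String) : List (List Char) × Int × Int :=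
  (PySem.List.pyRange 0 (park.length) 1).foldl
    (fun st i =>
      let pos := if PySem.Str.isIn "S" (PySem.List.pyGetD park i "")
                 then (i, PySem.Str.find (PySem.List.pyGetD park i "") "S")
                 else st.2
      (st.1 ++ [(PySem.List.pyGetD park i "").toList], pos))
    ([], -1, -1)

-- body of A's route loop
def solutionStep (park : List String) (new_park : List (List Char)) (rows cols : Int)
    (st : Int × Int) (r : String) : Int × Int :=
  match PySem.Str.split? r " " with
  | some [loc, dist] =>
    let d := (PySem.Int.ofStr? dist).getD 0   -- int(distance); Pre_ excludes non-int literals (ValueError)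
    let moves : Int × Int :=
      if loc = "E" then (0, d) else if loc = "W" then (0, -d)
      else if loc = "S" then (d, 0) else if loc = "N" then (-d, 0) else (0, 0)
    let tr := st.1 + moves.1
    let tc := st.2 + moves.2
    if ¬ (0 ≤ tr ∧ tr < rows ∧ 0 ≤ tc ∧ tc < cols) then st
    else if st.1 = tr then
      if ¬ (PySem.Str.findFrom (PySem.List.pyGetD park st.1 "") "X" (min st.2 tc) (some (max st.2 tc + 1)) = -1)
      then st
      else (tr, tc)
    else
      if (PySem.List.pyRange (min st.1 tr) (max st.1 tr + 1) 1).foldl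
           (fun temp j =>
             if temp then
               (if PySem.List.pyGetD (PySem.List.pyGetD new_park j []) st.2 ' ' = 'X' then false else temp)
             else temp) true
      then (tr, tc)
      else st
  | _ => st   -- Python raises ValueError on any other split shape; Pre_ excludes these routes

def solution (park : List String) (routes : List String) : List Int :=
  let scan := solutionRowScan park
  let new_park := scan.1
  let rows : Int := new_park.length
  let cols : Int := ((PySem.List.pyGetD new_park 0 []).length : Int)  -- len(new_park[0]); Pre_ excludes the empty park (IndexError)
  let fin := routes.foldl (solutionStep park new_park rows cols) (scan.2.1, scan.2.2)
  [fin.1, fin.2]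

-- ===== PORT B =====
-- r, c = -1, -1; for i, row in enumerate(park): c0 = row.find("S"); if c0 != -1: r, c = i, c0
def altFindS (park : List String) : Int × Int :=
  (PySem.List.enumerate park 0).foldl
    (fun st p =>
      let c0 := PySem.Str.find p.2 "S"
      if c0 ≠ -1 then (p.1, c0) else st)
    (-1, -1)

-- DIRS[d]: the literal dict; Pre_ guarantees d is one of the four keys (else Python raises KeyError)
def altDirs (d : String) : Option (Int × Int) :=
  if d = "E" then some (0, 1) else if d = "W" then some (0, -1)
  else if d = "S" then some (1, 0) else if d = "N" then some (-1, 0) else none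

-- the for/else candidate walk: n single-cell steps, none at the first blocked/out-of-bounds step
def altWalk (park : List String) (R C dr dc : Int) : Nat → Int → Int → Option (Int × Int)
  | 0, rr, cc => some (rr, cc)
  | n+1, rr, cc =>
    let rr' := rr + dr
    let cc' := cc + dc
    if (0 ≤ rr' ∧ rr' < R ∧ 0 ≤ cc' ∧ cc' < C) ∧
       ¬ PySem.List.pyGetD (PySem.List.pyGetD park rr' "").toList cc' ' ' = 'X'
    then altWalk park R C dr dc n rr' cc' else none

-- body of B's route loop
def solutionAltStep (park : List String) (R C : Int) (st : Int × Int) (route : String) : Int × Int :=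
  match PySem.Str.split? route " " with
  | some [d, nstr] =>
    match altDirs d with
    | none => st                                -- if d not in DIRS: continue
    | some dd =>
      let n := (PySem.Int.ofStr? nstr).getD 0   -- int(n); ValueError is outside Pre_
      match altWalk park R C dd.1 dd.2 n.toNat st.1 st.2 with   -- range(n) is empty for n ≤ 0
      | some p => p
      | none => st
  | _ => st   -- Python raises ValueError on any other split shape; Pre_ excludes these routes

def solution_alt (park : List String) (routes : List String) : List Int :=
  let rows : Int := park.length
  let cols : Int := ((PySem.List.pyGetD park 0 "").toList.length : Int)  -- len(park[0]); Pre_ excludes the empty park (IndexError)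
  let fin := routes.foldl (solutionAltStep park rows cols) (altFindS park)
  [fin.1, fin.2]

-- ===== PRECONDITION & SPEC =====
-- a route is accepted iff it splits on one space into two pieces and, when the first names a
-- direction, the second is a nonnegative int literal (A only calls int() in a direction branch,
-- and a negative distance moves A backwards, which is outside the problem's format)
def MoverOK (r : String) : Bool :=
  match PySem.Str.split? r " " with
  | some [loc, n] =>
    (!(loc == "E" || loc == "W" || loc == "S" || loc == "N")) ||
    (match PySem.Int.ofStr? n with
     | some k => decide (0 ≤ k)
     | none => false)
  | _ => false

-- a route that provably moves nothing: unknown direction letter, or distance 0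
def NoopRoute (r : String) : Bool :=
  match PySem.Str.split? r " " with
  | some [loc, n] =>
    (!(loc == "E" || loc == "W" || loc == "S" || loc == "N")) ||
    (PySem.Int.ofStr? n == some 0)
  | _ => false

-- Pre_ excludes: the empty park (A raises IndexError on park[0]); routes that do not split on one
-- space into two pieces, or whose direction is in EWSN with a non-int or negative distance (A
-- raises ValueError on the former, and a negative distance moves A backwards, outside the
-- problem's format); and ragged parks on which some route actually moves, where A's column bound
-- taken from row 0 lets the robot walk onto cells its own row does not have.
def Pre_solution (park : List String) (routes : List String) : Prop :=
  park ≠ [] ∧ (∀ r ∈ routes, MoverOK r = true) ∧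
  ((∀ s ∈ park, s.toList.length = (park.headD "").toList.length) ∨
   (∀ r ∈ routes, NoopRoute r = true))
instance (park : List String) (routes : List String) : Decidable (Pre_solution park routes) := by
  unfold Pre_solution; infer_instance

def pvWitness_solution : List String × List String := (["SO", "OO"], ["E 1", "S 1", "W 1"])

def Spec_solution (park : List String) (routes : List String) (out : List Int) : Prop := out = solution_alt park routes
instance (park : List String) (routes : List String) (out : List Int) : Decidable (Spec_solution park routes out) := by unfold Spec_solution; infer_instance

-- ===== CLAIM =====
def Claim_equal_solution : Prop := ∀ (park : List String) (routes : List String), Dom_solution park routes → Pre_solution park routes → Spec_solution park routes (solution park routes)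

-- ===== LEMMAS AND PROOFS =====

-- the cell of the park at integer coordinates, as both ports read it
def cellAt (park : List String) (r c : Int) : Char :=
  PySem.List.pyGetD (PySem.List.pyGetD park r "").toList c ' '

-- a position that is in bounds and not on an obstacle
def GoodPos (park : List String) (R C r c : Int) : Prop :=
  0 ≤ r ∧ r < R ∧ 0 ≤ c ∧ c < C ∧ cellAt park r c ≠ 'X'

-- every row reaches at least the column bound C (taken from row 0), and any 'S' sits left of C
def Rect (park : List String) (C : Int) : Prop :=
  ∀ s ∈ park, C ≤ (s.toList.length : Int) ∧ PySem.Str.find s "S" < C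

-- a foldl whose state components evolve independently splits into two foldls
lemma foldl_pair {α β γ : Type} (l : List γ) (f : α → γ → α) (g : β → γ → β) :
    ∀ (a : α) (b : β),
      l.foldl (fun st x => (f st.1 x, g st.2 x)) (a, b) = (l.foldl f a, l.foldl g b) := by
  induction l with
  | nil => intro a b; rfl
  | cons x xs ih => intro a b; simp only [List.foldl_cons]; exact ih (f a x) (g b x)

lemma foldl_snoc_map {α β : Type} (h : α → β) :
    ∀ (l : List α) (acc : List β),
      l.foldl (fun a x => a ++ [h x]) acc = acc ++ l.map h := by
  intro l
  induction l with
  | nil => intro acc; simp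
  | cons x xs ih => intro acc; simp [ih]

lemma isIn_S_iff_find (s : String) :
    PySem.Str.isIn "S" s = true ↔ ¬ PySem.Str.find s "S" = -1 := by
  rw [PySem.Str.isIn_eq, PySem.Str.find_eq, PySem.Chars.isIn_iff_infix,
    ← PySem.Chars.find_nonneg_iff]
  have := PySem.Chars.neg_one_le_find s.toList "S".toList
  omega

-- B's start scan written as a right-append recursion
lemma altFindS_snoc (l : List String) (row : String) :
    altFindS (l ++ [row]) = (if ¬ PySem.Str.find row "S" = -1
      then ((l.length : Int), PySem.Str.find row "S") else altFindS l) := by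
  unfold altFindS
  rw [PySem.List.enumerate_append, List.foldl_append, PySem.List.enumerate_cons,
    PySem.List.enumerate_nil]
  simp

-- A's first loop computes (park as char lists, B's start position)
lemma scan_eq (park : List String) :
    solutionRowScan park = (park.map String.toList, altFindS park) := by
  unfold solutionRowScan
  have hsplit := foldl_pair (PySem.List.pyRange 0 (park.length) 1)
    (fun (a : List (List Char)) (i : Int) => a ++ [(PySem.List.pyGetD park i "").toList])
    (fun (p : Int × Int) (i : Int) =>
      if PySem.Str.isIn "S" (PySem.List.pyGetD park i "")
      then (i, PySem.Str.find (PySem.List.pyGetD park i "") "S") else p)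
    [] (-1, -1)
  rw [hsplit]
  have h1 : (PySem.List.pyRange 0 (park.length) 1).foldl
      (fun (a : List (List Char)) (i : Int) => a ++ [(PySem.List.pyGetD park i "").toList]) []
      = park.map String.toList := by
    rw [PySem.List.foldl_pyRange_zero_pyGetD' park ""
      (fun (a : List (List Char)) (row : String) => a ++ [row.toList]) []]
    simpa using foldl_snoc_map String.toList park []
  have h2 : (PySem.List.pyRange 0 (park.length) 1).foldl
      (fun (p : Int × Int) (i : Int) =>
        if PySem.Str.isIn "S" (PySem.List.pyGetD park i "")
        then (i, PySem.Str.find (PySem.List.pyGetD park i "") "S") else p) (-1, -1)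
      = altFindS park := by
    unfold altFindS
    rw [PySem.List.enumerate_eq_map_pyRange park "", List.foldl_map]
    simp only [PySem.List.len_eq]
    congr 1
    funext p i
    dsimp only
    by_cases hS : PySem.Str.isIn "S" (PySem.List.pyGetD park i "") = true
    · rw [if_pos hS, if_pos ((isIn_S_iff_find _).mp hS)]
    · rw [if_neg hS, if_neg (fun h => hS ((isIn_S_iff_find _).mpr h))]
  rw [h1, h2]

-- ragged-free parks satisfy Rect
lemma rect_of_eqlen (park : List String) (C : Int)
    (heq : ∀ s ∈ park, (s.toList.length : Int) = C) : Rect park C := by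
  intro s hs
  refine ⟨le_of_eq (heq s hs).symm, ?_⟩
  by_cases h0 : 0 ≤ PySem.Str.find s "S"
  · rw [PySem.Str.find_eq] at h0 ⊢
    obtain ⟨hpre, -⟩ := PySem.Chars.find_spec h0
    obtain ⟨u, hu⟩ := hpre
    have hlen := congrArg List.length hu
    rw [List.length_append, List.length_drop,
      show ("S".toList.length) = 1 from rfl] at hlen
    have := heq s hs
    omega
  · have h1 := PySem.Chars.neg_one_le_find s.toList "S".toList
    rw [PySem.Str.find_eq] at h0 ⊢
    have hC : 0 ≤ C := by have := heq s hs; omega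
    omega

-- loop invariant of the route walk: the sentinel (no 'S' anywhere), or a valid position
def PosInv (park : List String) (R C : Int) (p : Int × Int) : Prop :=
  p = (-1, -1) ∨ GoodPos park R C p.1 p.2

-- the start position: the sentinel, or an in-row 'S' cell
def StartsAtS (park : List String) (p : Int × Int) : Prop :=
  p = (-1, -1) ∨ (0 ≤ p.1 ∧ p.1 < (park.length : Int) ∧ 0 ≤ p.2 ∧
    PySem.List.pyGetD (PySem.List.pyGetD park p.1 "").toList p.2 ' ' = 'S' ∧
    p.2 < ((PySem.List.pyGetD park p.1 "").toList.length : Int))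

lemma row_append_left (l : List String) (row : String) (r : Int) (h0 : 0 ≤ r)
    (hr : r < (l.length : Int)) :
    PySem.List.pyGetD (l ++ [row]) r "" = PySem.List.pyGetD l r "" := by
  rw [PySem.List.pyGetD_of_nonneg _ _ h0, PySem.List.pyGetD_of_nonneg _ _ h0]
  have hlt : r.toNat < l.length := by omega
  rw [List.getD_eq_getElem _ _ (by simp; omega), List.getD_eq_getElem _ _ hlt]
  exact List.getElem_append_left _

-- the character at a found 'S' index is 'S', and the index lies inside the row
lemma find_cell (row : String) (h0 : 0 ≤ PySem.Chars.find row.toList "S".toList) :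
    PySem.List.pyGetD row.toList (PySem.Chars.find row.toList "S".toList) ' ' = 'S' ∧
    PySem.Chars.find row.toList "S".toList < (row.toList.length : Int) := by
  obtain ⟨hpre, -⟩ := PySem.Chars.find_spec h0
  obtain ⟨u, hu⟩ := hpre
  set k := (PySem.Chars.find row.toList "S".toList).toNat with hk
  have hcell : row.toList[k]? = some 'S' := by
    have hd : (row.toList.drop k)[0]? = some 'S' := by rw [← hu]; rfl
    rwa [List.getElem?_drop, Nat.add_zero] at hd
  obtain ⟨hklen, hkel⟩ := List.getElem?_eq_some_iff.mp hcell
  constructor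
  · rw [PySem.List.pyGetD_of_nonneg _ _ h0, ← hk, List.getD_eq_getElem _ _ hklen, hkel]
  · omega

-- on a rectangular park, B's start scan keeps the walk invariant
lemma findS_inv (C : Int) (park : List String) (hrect : Rect park C) :
    PosInv park park.length C (altFindS park) := by
  induction park using List.reverseRecOn with
  | nil => exact Or.inl rfl
  | append_singleton l row ih =>
    rw [altFindS_snoc]
    by_cases hS : ¬ PySem.Str.find row "S" = -1
    · right
      rw [if_pos hS]
      have h0 : 0 ≤ PySem.Str.find row "S" := by
        have := PySem.Chars.neg_one_le_find row.toList "S".toList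
        rw [PySem.Str.find_eq]; rw [PySem.Str.find_eq] at hS; omega
      have hrow : PySem.List.pyGetD (l ++ [row]) ((l.length : Int)) "" = row := by
        rw [PySem.List.pyGetD_natCast, List.getD_eq_getElem _ _ (by simp)]
        simp
      obtain ⟨hCle, hfd⟩ := hrect row (by simp)
      unfold GoodPos cellAt
      dsimp only
      rw [hrow]
      rw [PySem.Str.find_eq] at h0 ⊢
      obtain ⟨hcell, -⟩ := find_cell row h0
      refine ⟨by omega, by simp, h0, hfd, by rw [hcell]; decide⟩
    · rw [if_neg hS]
      rcases ih (fun s hs => hrect s (List.mem_append_left _ hs)) with hmi | hgd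
      · exact Or.inl hmi
      · right
        unfold GoodPos cellAt at hgd ⊢
        obtain ⟨h1, h2, h3, h4, h5⟩ := hgd
        refine ⟨h1, by simp; omega, h3, h4, ?_⟩
        rw [row_append_left l row _ h1 h2]
        exact h5

-- B's start scan lands on an 'S' cell of its own row (or stays at the sentinel)
lemma findS_start (park : List String) : StartsAtS park (altFindS park) := by
  induction park using List.reverseRecOn with
  | nil => exact Or.inl rfl
  | append_singleton l row ih =>
    rw [altFindS_snoc]
    by_cases hS : ¬ PySem.Str.find row "S" = -1
    · right
      have h0 : 0 ≤ PySem.Str.find row "S" := by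
        have := PySem.Chars.neg_one_le_find row.toList "S".toList
        rw [PySem.Str.find_eq]; rw [PySem.Str.find_eq] at hS; omega
      have hrow : PySem.List.pyGetD (l ++ [row]) ((l.length : Int)) "" = row := by
        rw [PySem.List.pyGetD_natCast, List.getD_eq_getElem _ _ (by simp)]
        simp
      rw [if_pos hS]
      dsimp only
      rw [hrow]
      rw [PySem.Str.find_eq] at h0 ⊢
      obtain ⟨hcell, hlt⟩ := find_cell row h0
      exact ⟨by omega, by simp, h0, hcell, hlt⟩
    · rw [if_neg hS]
      rcases ih with hmi | hgd
      · exact Or.inl hmi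
      · right
        obtain ⟨h1, h2, h3, h4, h5⟩ := hgd
        refine ⟨h1, by simp; omega, h3, ?_, ?_⟩ <;> rw [row_append_left l row _ h1 h2]
        · exact h4
        · exact h5

-- characterisation of s.find("X", lo, hi) == -1 on an in-range window
lemma findFrom_seg (s : List Char) (lo hi : Int) (h0 : 0 ≤ lo) (hlh : lo ≤ hi)
    (hhi : hi ≤ (s.length : Int)) :
    PySem.Chars.findFrom s ['X'] lo (some hi) = -1 ↔
      ∀ k : Int, lo ≤ k → k < hi → PySem.List.pyGetD s k ' ' ≠ 'X' := by
  have he : (if (s.length : Int) < hi then (s.length : Int)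
      else if hi < 0 then (if hi + s.length < 0 then 0 else hi + s.length) else hi) = hi := by
    rw [if_neg (by omega), if_neg (by omega)]
  have hst : (if lo < 0 then (if lo + (s.length : Int) < 0 then 0 else lo + s.length) else lo)
      = lo := by rw [if_neg (by omega)]
  have hmem : 'X' ∈ (s.take hi.toNat).drop lo.toNat ↔
      ∃ k : Int, lo ≤ k ∧ k < hi ∧ PySem.List.pyGetD s k ' ' = 'X' := by
    constructor
    · intro hx
      obtain ⟨j, hj, hje⟩ := List.mem_iff_getElem.mp hx
      have hjlen : lo.toNat + j < s.length := by
        have := hj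
        simp only [List.length_drop, List.length_take] at this
        omega
      refine ⟨lo + j, by omega, by
        have := hj
        simp only [List.length_drop, List.length_take] at this
        omega, ?_⟩
      rw [PySem.List.pyGetD_of_nonneg _ _ (by omega),
        List.getD_eq_getElem _ _ (by omega : (lo + (j : Int)).toNat < s.length)]
      rw [List.getElem_drop, List.getElem_take] at hje
      rw [← hje]
      congr 1
      omega
    · rintro ⟨k, hk1, hk2, hke⟩
      have hklen : k.toNat < s.length := by omega
      rw [PySem.List.pyGetD_of_nonneg _ _ (by omega), List.getD_eq_getElem _ _ hklen] at hke
      refine List.mem_iff_getElem.mpr ⟨k.toNat - lo.toNat, by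
        simp only [List.length_drop, List.length_take]; omega, ?_⟩
      rw [List.getElem_drop, List.getElem_take, ← hke]
      congr 1
      omega
  have hinf : ['X'] <:+: (s.take hi.toNat).drop lo.toNat ↔ 'X' ∈ (s.take hi.toNat).drop lo.toNat := by
    constructor
    · intro hx
      exact hx.mem (by simp)
    · intro hx
      obtain ⟨u, v, huv⟩ := List.append_of_mem hx
      exact ⟨u, v, by rw [huv]; simp⟩
  simp only [PySem.Chars.findFrom, he, hst, if_neg (by omega : ¬ hi < lo)]
  by_cases hr : PySem.Chars.find ((s.take hi.toNat).drop lo.toNat) ['X'] = -1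
  · rw [if_pos hr]
    rw [PySem.Chars.find_eq_neg_one_iff, hinf, hmem] at hr
    simp only [true_iff]
    intro k hk1 hk2 hke
    exact hr ⟨k, hk1, hk2, hke⟩
  · rw [if_neg hr]
    have h0 : 0 ≤ PySem.Chars.find ((s.take hi.toNat).drop lo.toNat) ['X'] := by
      have := PySem.Chars.neg_one_le_find ((s.take hi.toNat).drop lo.toNat) ['X']
      omega
    constructor
    · intro hcon; omega
    · intro hall
      exfalso
      have : ['X'] <:+: (s.take hi.toNat).drop lo.toNat := by
        rw [← PySem.Chars.find_nonneg_iff]; exact h0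
      obtain ⟨k, hk1, hk2, hke⟩ := hmem.mp (hinf.mp this)
      exact hall k hk1 hk2 hke

-- A's flag-with-break loop is an `all` over the range
lemma flag_foldl (l : List Int) (p : Int → Prop) [DecidablePred p] : ∀ b : Bool,
    l.foldl (fun temp j => if temp then (if p j then false else temp) else temp) b
    = (b && l.all (fun j => decide ¬ p j)) := by
  induction l with
  | nil => intro b; cases b <;> simp
  | cons x xs ih =>
    intro b
    cases b with
    | false => simp only [List.foldl_cons, if_neg Bool.false_ne_true, ih, Bool.false_and]
    | true =>
      rw [List.foldl_cons, if_pos rfl]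
      by_cases hp : p x
      · rw [if_pos hp, ih]; simp [hp]
      · rw [if_neg hp, ih]; simp [hp]

lemma walk_some (park : List String) (R C dr dc : Int) : ∀ (m : Nat) (r c : Int),
    (∀ k : Nat, 1 ≤ k → k ≤ m → GoodPos park R C (r + k * dr) (c + k * dc)) →
    altWalk park R C dr dc m r c = some (r + m * dr, c + m * dc) := by
  intro m
  induction m with
  | zero => intro r c _; simp [altWalk]
  | succ m ih =>
    intro r c hgood
    have h1 := hgood 1 le_rfl (by omega)
    unfold altWalk
    rw [if_pos]
    · rw [ih (r + dr) (c + dc) (fun k hk1 hkm => by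
        have := hgood (k + 1) (by omega) (by omega)
        have e1 : r + dr + (k : Int) * dr = r + ((k : Int) + 1) * dr := by ring
        have e2 : c + dc + (k : Int) * dc = c + ((k : Int) + 1) * dc := by ring
        rw [e1, e2]
        push_cast at this ⊢
        convert this using 3)]
      congr 1
      refine Prod.ext ?_ ?_ <;> (show _ = _; push_cast; ring)
    · unfold GoodPos cellAt at h1
      push_cast at h1
      simp only [one_mul] at h1
      exact ⟨⟨h1.1, h1.2.1, h1.2.2.1, h1.2.2.2.1⟩, h1.2.2.2.2⟩

lemma walk_none (park : List String) (R C dr dc : Int) : ∀ (m : Nat) (r c : Int),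
    ¬ (∀ k : Nat, 1 ≤ k → k ≤ m → GoodPos park R C (r + k * dr) (c + k * dc)) →
    altWalk park R C dr dc m r c = none := by
  intro m
  induction m with
  | zero => intro r c hbad; exact absurd (fun k hk1 hk0 => absurd (Nat.le_trans hk1 hk0) (by omega)) hbad
  | succ m ih =>
    intro r c hbad
    by_cases h1 : GoodPos park R C (r + dr) (c + dc)
    · unfold altWalk
      rw [if_pos]
      · refine ih (r + dr) (c + dc) (fun hall => hbad fun k hk1 hkm => ?_)
        match k, hk1 with
        | 1, _ => simpa using h1
        | (j + 2), _ =>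
          have := hall (j + 1) (by omega) (by omega)
          have e1 : r + dr + ((j : Int) + 1) * dr = r + (((j : Int) + 1) + 1) * dr := by ring
          have e2 : c + dc + ((j : Int) + 1) * dc = c + (((j : Int) + 1) + 1) * dc := by ring
          push_cast at this ⊢
          rw [e1, e2] at this
          convert this using 3
      · unfold GoodPos cellAt at h1
        exact ⟨⟨h1.1, h1.2.1, h1.2.2.1, h1.2.2.2.1⟩, h1.2.2.2.2⟩
    · have hc : ¬ ((0 ≤ r + dr ∧ r + dr < R ∧ 0 ≤ c + dc ∧ c + dc < C) ∧
          ¬ PySem.List.pyGetD (PySem.List.pyGetD park (r + dr) "").toList (c + dc) ' ' = 'X') := by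
        unfold GoodPos cellAt at h1
        tauto
      unfold altWalk
      rw [if_neg hc]

-- new_park is park with each row as a char list
lemma newpark_get (park : List String) (j : Int) :
    PySem.List.pyGetD (park.map String.toList) j [] = (PySem.List.pyGetD park j "").toList := by
  simpa using PySem.List.pyGetD_map String.toList park j ""

-- a move of length 0 leaves a valid position unchanged (A's horizontal branch with window c..c)
lemma zero_move (park : List String) (C : Int) (hrect : Rect park C) (r c : Int) (v : Int × Int)
    (hg : GoodPos park park.length C r c) :
    (if ¬ (0 ≤ r + 0 ∧ r + 0 < (park.length : Int) ∧ 0 ≤ c + 0 ∧ c + 0 < C) then (r, c)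
     else if r = r + 0 then
       (if ¬ (PySem.Str.findFrom (PySem.List.pyGetD park r "") "X" (min c (c + 0))
              (some (max c (c + 0) + 1)) = -1) then (r, c) else (r + 0, c + 0))
     else v) = (r, c) := by
  unfold GoodPos cellAt at hg
  obtain ⟨hr0, hrL, hc0, hcC, hcell⟩ := hg
  have hrnat : r.toNat < park.length := by omega
  have hrow : PySem.List.pyGetD park r "" = park[r.toNat] := by
    rw [PySem.List.pyGetD_of_nonneg _ _ hr0]; exact List.getD_eq_getElem _ _ hrnat
  have hlen : C ≤ (((PySem.List.pyGetD park r "").toList.length : Nat) : Int) := by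
    rw [hrow]; exact (hrect _ (List.getElem_mem hrnat)).1
  rw [if_neg (by intro hcon; exact hcon ⟨by omega, by omega, by omega, by omega⟩),
    if_pos (by omega : r = r + 0)]
  have hseg := findFrom_seg (PySem.List.pyGetD park r "").toList (min c (c + 0))
    (max c (c + 0) + 1) (by omega) (by omega) (by omega)
  have hfind : PySem.Str.findFrom (PySem.List.pyGetD park r "") "X" (min c (c + 0))
      (some (max c (c + 0) + 1)) = -1 := by
    rw [PySem.Str.findFrom_eq, show ("X".toList) = ['X'] from rfl]
    refine hseg.mpr fun k hk1 hk2 => ?_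
    rw [show k = c from by omega]
    exact hcell
  rw [if_neg (fun hn => hn hfind)]
  refine Prod.ext ?_ ?_ <;> dsimp <;> omega

-- a horizontal route of A equals B's walk (dr = 0), and the result stays valid
lemma horiz_case (park : List String) (C : Int) (hrect : Rect park C) (r c d dcs : Int) (m : Nat)
    (v : Int × Int) (hg : GoodPos park park.length C r c)
    (hmd : (m : Int) * dcs = d) (hdc : dcs = 1 ∨ dcs = -1) :
    (if ¬ (0 ≤ r + 0 ∧ r + 0 < (park.length : Int) ∧ 0 ≤ c + d ∧ c + d < C) then (r, c)
     else if r = r + 0 then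
       (if ¬ (PySem.Str.findFrom (PySem.List.pyGetD park r "") "X" (min c (c + d))
              (some (max c (c + d) + 1)) = -1) then (r, c) else (r + 0, c + d))
     else v)
    = (match altWalk park park.length C 0 dcs m r c with
       | some p => p
       | none => (r, c))
    ∧ GoodPos park park.length C (match altWalk park park.length C 0 dcs m r c with
       | some p => p
       | none => (r, c)).1 (match altWalk park park.length C 0 dcs m r c with
       | some p => p
       | none => (r, c)).2 := by
  have hgu := hg
  unfold GoodPos cellAt at hgu
  obtain ⟨hr0, hrL, hc0, hcC, hcell⟩ := hgu
  have hrnat : r.toNat < park.length := by omega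
  have hrow : PySem.List.pyGetD park r "" = park[r.toNat] := by
    rw [PySem.List.pyGetD_of_nonneg _ _ hr0]; exact List.getD_eq_getElem _ _ hrnat
  have hlen : C ≤ (((PySem.List.pyGetD park r "").toList.length : Nat) : Int) := by
    rw [hrow]; exact (hrect _ (List.getElem_mem hrnat)).1
  by_cases hb : 0 ≤ c + d ∧ c + d < C
  · rw [if_neg (by intro hcon; exact hcon ⟨by omega, by omega, hb.1, hb.2⟩),
      if_pos (by omega : r = r + 0)]
    have hseg := findFrom_seg (PySem.List.pyGetD park r "").toList (min c (c + d))
      (max c (c + d) + 1) (by omega) (by omega) (by omega)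
    by_cases hfree : ∀ k : Int, min c (c + d) ≤ k → k < max c (c + d) + 1 →
        PySem.List.pyGetD (PySem.List.pyGetD park r "").toList k ' ' ≠ 'X'
    · have hfind : PySem.Str.findFrom (PySem.List.pyGetD park r "") "X" (min c (c + d))
          (some (max c (c + d) + 1)) = -1 := by
        rw [PySem.Str.findFrom_eq, show ("X".toList) = ['X'] from rfl]
        exact hseg.mpr hfree
      rw [if_neg (fun hn => hn hfind)]
      have hall : ∀ k : Nat, 1 ≤ k → k ≤ m →
          GoodPos park park.length C (r + k * 0) (c + k * dcs) := by
        intro k hk1 hkm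
        unfold GoodPos cellAt
        rcases hdc with rfl | rfl <;>
          (refine ⟨by omega, by omega, by omega, by omega, ?_⟩
           rw [show r + (k : Int) * 0 = r from by ring]
           exact hfree _ (by omega) (by omega))
      have hBval : (match altWalk park (park.length : Int) C 0 dcs m r c with
          | some p => p
          | none => (r, c)) = (r + (m : Int) * 0, c + (m : Int) * dcs) := by
        rw [walk_some park _ C 0 dcs m r c hall]
      rw [hBval]
      constructor
      · refine Prod.ext ?_ ?_ <;> dsimp <;> rcases hdc with rfl | rfl <;> omega
      · unfold GoodPos cellAt
        rcases hdc with rfl | rfl <;>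
          (refine ⟨by omega, by omega, by omega, by omega, ?_⟩
           rw [show r + (m : Int) * 0 = r from by ring]
           exact hfree _ (by omega) (by omega))
    · have hnfind : ¬ PySem.Str.findFrom (PySem.List.pyGetD park r "") "X" (min c (c + d))
          (some (max c (c + d) + 1)) = -1 := by
        rw [PySem.Str.findFrom_eq, show ("X".toList) = ['X'] from rfl]
        intro h; exact hfree (hseg.mp h)
      rw [if_pos hnfind]
      have hnall : ¬ (∀ k : Nat, 1 ≤ k → k ≤ m →
          GoodPos park (park.length : Int) C (r + k * 0) (c + k * dcs)) := by
        intro hall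
        push Not at hfree
        obtain ⟨k0, hk01, hk02, hk0X⟩ := hfree
        have hk0c : k0 ≠ c := fun he => by rw [he] at hk0X; exact hcell hk0X
        rcases hdc with rfl | rfl
        · set j : Nat := (k0 - c).toNat with hj
          have hjb : 1 ≤ j ∧ j ≤ m ∧ c + (j : Int) * 1 = k0 := ⟨by omega, by omega, by omega⟩
          have hgj := hall j hjb.1 hjb.2.1
          unfold GoodPos cellAt at hgj
          obtain ⟨-, -, -, -, hX⟩ := hgj
          rw [show r + (j : Int) * 0 = r from by ring, hjb.2.2] at hX
          exact hX hk0X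
        · set j : Nat := (c - k0).toNat with hj
          have hjb : 1 ≤ j ∧ j ≤ m ∧ c + (j : Int) * (-1) = k0 := ⟨by omega, by omega, by omega⟩
          have hgj := hall j hjb.1 hjb.2.1
          unfold GoodPos cellAt at hgj
          obtain ⟨-, -, -, -, hX⟩ := hgj
          rw [show r + (j : Int) * 0 = r from by ring, hjb.2.2] at hX
          exact hX hk0X
      rw [walk_none park _ C 0 dcs m r c hnall]
      exact ⟨rfl, hg⟩
  · rw [if_pos (by intro hcon; exact hb ⟨hcon.2.2.1, hcon.2.2.2⟩)]
    have hnall : ¬ (∀ k : Nat, 1 ≤ k → k ≤ m →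
        GoodPos park (park.length : Int) C (r + k * 0) (c + k * dcs)) := by
      intro hall
      rcases Nat.eq_zero_or_pos m with rfl | hm
      · apply hb
        rcases hdc with rfl | rfl <;> (constructor <;> omega)
      · have hgm := hall m hm le_rfl
        unfold GoodPos at hgm
        obtain ⟨-, -, h3, h4, -⟩ := hgm
        rcases hdc with rfl | rfl <;> (exact hb ⟨by omega, by omega⟩)
    rw [walk_none park _ C 0 dcs m r c hnall]
    exact ⟨rfl, hg⟩

-- a vertical route of A equals B's walk (dc = 0), and the result stays valid
lemma vert_case (park : List String) (C : Int) (r c d drs : Int) (m : Nat)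
    (v : Int × Int) (hg : GoodPos park park.length C r c)
    (hmd : (m : Int) * drs = d) (hdr : drs = 1 ∨ drs = -1) (hd0 : d ≠ 0) :
    (if ¬ (0 ≤ r + d ∧ r + d < (park.length : Int) ∧ 0 ≤ c + 0 ∧ c + 0 < C) then (r, c)
     else if r = r + d then v
     else
       (if (PySem.List.pyRange (min r (r + d)) (max r (r + d) + 1) 1).foldl
            (fun temp j =>
              if temp then
                (if PySem.List.pyGetD (PySem.List.pyGetD (park.map String.toList) j []) c ' ' = 'X'
                 then false else temp)
              else temp) true
        then (r + d, c + 0) else (r, c)))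
    = (match altWalk park park.length C drs 0 m r c with
       | some p => p
       | none => (r, c))
    ∧ GoodPos park park.length C (match altWalk park park.length C drs 0 m r c with
       | some p => p
       | none => (r, c)).1 (match altWalk park park.length C drs 0 m r c with
       | some p => p
       | none => (r, c)).2 := by
  have hgu := hg
  unfold GoodPos cellAt at hgu
  obtain ⟨hr0, hrL, hc0, hcC, hcell⟩ := hgu
  by_cases hb : 0 ≤ r + d ∧ r + d < (park.length : Int)
  · rw [if_neg (by intro hcon; exact hcon ⟨hb.1, hb.2, by omega, by omega⟩),
      if_neg (by omega : ¬ r = r + d)]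
    simp only [newpark_get]
    rw [flag_foldl (PySem.List.pyRange (min r (r + d)) (max r (r + d) + 1) 1)
      (fun j => PySem.List.pyGetD (PySem.List.pyGetD park j "").toList c ' ' = 'X') true,
      Bool.true_and]
    by_cases hfree : ∀ j : Int, min r (r + d) ≤ j → j < max r (r + d) + 1 →
        PySem.List.pyGetD (PySem.List.pyGetD park j "").toList c ' ' ≠ 'X'
    · rw [if_pos (by
        rw [List.all_eq_true]
        intro j hj
        rw [PySem.List.mem_pyRange_one] at hj
        rw [decide_eq_true_iff]
        exact hfree j hj.1 hj.2)]
      have hall : ∀ k : Nat, 1 ≤ k → k ≤ m →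
          GoodPos park park.length C (r + k * drs) (c + k * 0) := by
        intro k hk1 hkm
        unfold GoodPos cellAt
        rcases hdr with rfl | rfl <;>
          (refine ⟨by omega, by omega, by omega, by omega, ?_⟩
           rw [show c + (k : Int) * 0 = c from by ring]
           exact hfree _ (by omega) (by omega))
      have hBval : (match altWalk park (park.length : Int) C drs 0 m r c with
          | some p => p
          | none => (r, c)) = (r + (m : Int) * drs, c + (m : Int) * 0) := by
        rw [walk_some park _ C drs 0 m r c hall]
      rw [hBval]
      constructor
      · refine Prod.ext ?_ ?_ <;> dsimp <;> rcases hdr with rfl | rfl <;> omega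
      · unfold GoodPos cellAt
        rcases hdr with rfl | rfl <;>
          (refine ⟨by omega, by omega, by omega, by omega, ?_⟩
           rw [show c + (m : Int) * 0 = c from by ring]
           exact hfree _ (by omega) (by omega))
    · rw [if_neg (by
        intro hallb
        push Not at hfree
        obtain ⟨j0, hj01, hj02, hj0X⟩ := hfree
        have hd := List.all_eq_true.mp hallb j0
          (PySem.List.mem_pyRange_one.mpr ⟨hj01, hj02⟩)
        exact of_decide_eq_true hd hj0X)]
      have hnall : ¬ (∀ k : Nat, 1 ≤ k → k ≤ m →
          GoodPos park (park.length : Int) C (r + k * drs) (c + k * 0)) := by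
        intro hall
        push Not at hfree
        obtain ⟨j0, hj01, hj02, hj0X⟩ := hfree
        have hj0r : j0 ≠ r := fun he => by rw [he] at hj0X; exact hcell hj0X
        rcases hdr with rfl | rfl
        · set k : Nat := (j0 - r).toNat with hk
          have hkb : 1 ≤ k ∧ k ≤ m ∧ r + (k : Int) * 1 = j0 := ⟨by omega, by omega, by omega⟩
          have hgk := hall k hkb.1 hkb.2.1
          unfold GoodPos cellAt at hgk
          obtain ⟨-, -, -, -, hX⟩ := hgk
          rw [show c + (k : Int) * 0 = c from by ring, hkb.2.2] at hX
          exact hX hj0X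
        · set k : Nat := (r - j0).toNat with hk
          have hkb : 1 ≤ k ∧ k ≤ m ∧ r + (k : Int) * (-1) = j0 := ⟨by omega, by omega, by omega⟩
          have hgk := hall k hkb.1 hkb.2.1
          unfold GoodPos cellAt at hgk
          obtain ⟨-, -, -, -, hX⟩ := hgk
          rw [show c + (k : Int) * 0 = c from by ring, hkb.2.2] at hX
          exact hX hj0X
      rw [walk_none park _ C drs 0 m r c hnall]
      exact ⟨rfl, hg⟩
  · rw [if_pos (by intro hcon; exact hb ⟨hcon.1, hcon.2.1⟩)]
    have hnall : ¬ (∀ k : Nat, 1 ≤ k → k ≤ m →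
        GoodPos park (park.length : Int) C (r + k * drs) (c + k * 0)) := by
      intro hall
      rcases Nat.eq_zero_or_pos m with rfl | hm
      · exact hd0 (by omega)
      · have hgm := hall m hm le_rfl
        unfold GoodPos at hgm
        obtain ⟨h1, h2, -, -, -⟩ := hgm
        rcases hdr with rfl | rfl <;> (exact hb ⟨by omega, by omega⟩)
    rw [walk_none park _ C drs 0 m r c hnall]
    exact ⟨rfl, hg⟩

-- the candidate walk from the sentinel position never completes a positive move
lemma walk_from_minus1 (park : List String) (C dr dc : Int) (hz : dr = 0 ∨ dc = 0) (m : Nat) :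
    (match altWalk park park.length C dr dc m (-1) (-1) with
     | some p => p
     | none => ((-1 : Int), (-1 : Int))) = (-1, -1) := by
  cases m with
  | zero => rfl
  | succ m =>
    have hno : ¬ (∀ k : Nat, 1 ≤ k → k ≤ m + 1 →
        GoodPos park (park.length : Int) C (-1 + k * dr) (-1 + k * dc)) := by
      intro hall
      have h := hall 1 le_rfl (by omega)
      unfold GoodPos at h
      obtain ⟨h1, -, h3, -, -⟩ := h
      rcases hz with rfl | rfl
      · omega
      · omega
    rw [walk_none park _ C dr dc (m + 1) (-1) (-1) hno]

-- a zero displacement leaves any start-at-'S' position unchanged in A's step shape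
lemma noop_move (park : List String) (rows cols r c : Int) (v : Int × Int)
    (hse : StartsAtS park (r, c)) :
    (if ¬ (0 ≤ r + 0 ∧ r + 0 < rows ∧ 0 ≤ c + 0 ∧ c + 0 < cols) then (r, c)
     else if r = r + 0 then
       (if ¬ (PySem.Str.findFrom (PySem.List.pyGetD park r "") "X" (min c (c + 0))
              (some (max c (c + 0) + 1)) = -1) then (r, c) else (r + 0, c + 0))
     else v) = (r, c) := by
  by_cases hbc : 0 ≤ r + 0 ∧ r + 0 < rows ∧ 0 ≤ c + 0 ∧ c + 0 < cols
  · rcases hse with hmi | ⟨h1, h2, h3, hcell, hclen⟩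
    · exfalso
      have hc : c = -1 := congrArg Prod.snd hmi
      omega
    · dsimp only at hcell hclen
      rw [if_neg (by intro hcon; exact hcon hbc), if_pos (by omega : r = r + 0)]
      have hseg := findFrom_seg (PySem.List.pyGetD park r "").toList (min c (c + 0))
        (max c (c + 0) + 1) (by omega) (by omega) (by omega)
      have hfind : PySem.Str.findFrom (PySem.List.pyGetD park r "") "X" (min c (c + 0))
          (some (max c (c + 0) + 1)) = -1 := by
        rw [PySem.Str.findFrom_eq, show ("X".toList) = ['X'] from rfl]
        refine hseg.mpr fun k hk1 hk2 => ?_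
        rw [show k = c from by omega, hcell]
        decide
      rw [if_neg (fun hn => hn hfind)]
      refine Prod.ext ?_ ?_ <;> dsimp <;> omega
  · rw [if_pos hbc]

-- on a no-op route, A's step returns its input position
lemma stepA_noop (park : List String) (np : List (List Char)) (rows cols : Int)
    (route : String) (hno : NoopRoute route = true) (st : Int × Int)
    (hse : StartsAtS park st) :
    solutionStep park np rows cols st route = st := by
  unfold NoopRoute at hno
  unfold solutionStep
  obtain ⟨r, c⟩ := st
  rcases hsplit : PySem.Str.split? route " " with _ | parts
  · rfl
  rw [hsplit] at hno
  rcases parts with _ | ⟨loc, _ | ⟨dist, _ | ⟨x, parts⟩⟩⟩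
  · rfl
  · rfl
  · have hno' : ((!(loc == "E" || loc == "W" || loc == "S" || loc == "N")) ||
        (PySem.Int.ofStr? dist == some 0)) = true := hno
    dsimp only
    by_cases hE : loc = "E"
    · have hz : PySem.Int.ofStr? dist = some 0 := by
        rw [hE] at hno'; simpa using hno'
      rw [hz]
      simp only [Option.getD_some, if_pos hE]
      exact noop_move park rows cols r c _ hse
    · simp only [if_neg hE]
      by_cases hW : loc = "W"
      · have hz : PySem.Int.ofStr? dist = some 0 := by
          rw [hW] at hno'; simpa using hno'
        rw [hz]
        simp only [Option.getD_some, if_pos hW, neg_zero]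
        exact noop_move park rows cols r c _ hse
      · simp only [if_neg hW]
        by_cases hS : loc = "S"
        · have hz : PySem.Int.ofStr? dist = some 0 := by
            rw [hS] at hno'; simpa using hno'
          rw [hz]
          simp only [Option.getD_some, if_pos hS]
          exact noop_move park rows cols r c _ hse
        · simp only [if_neg hS]
          by_cases hN : loc = "N"
          · have hz : PySem.Int.ofStr? dist = some 0 := by
              rw [hN] at hno'; simpa using hno'
            rw [hz]
            simp only [Option.getD_some, if_pos hN, neg_zero]
            exact noop_move park rows cols r c _ hse
          · simp only [if_neg hN]
            exact noop_move park rows cols r c _ hse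
  · rfl

-- on a no-op route, B's step returns its input position
lemma stepB_noop (park : List String) (R C : Int) (route : String)
    (hno : NoopRoute route = true) (st : Int × Int) :
    solutionAltStep park R C st route = st := by
  unfold NoopRoute at hno
  unfold solutionAltStep
  obtain ⟨r, c⟩ := st
  rcases hsplit : PySem.Str.split? route " " with _ | parts
  · rfl
  rw [hsplit] at hno
  rcases parts with _ | ⟨loc, _ | ⟨dist, _ | ⟨x, parts⟩⟩⟩
  · rfl
  · rfl
  · have hno' : ((!(loc == "E" || loc == "W" || loc == "S" || loc == "N")) ||
        (PySem.Int.ofStr? dist == some 0)) = true := hno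
    dsimp only
    unfold altDirs
    by_cases hE : loc = "E"
    · have hz : PySem.Int.ofStr? dist = some 0 := by
        rw [hE] at hno'; simpa using hno'
      rw [hz]
      simp only [Option.getD_some, if_pos hE, Int.toNat_zero]
      rfl
    · simp only [if_neg hE]
      by_cases hW : loc = "W"
      · have hz : PySem.Int.ofStr? dist = some 0 := by
          rw [hW] at hno'; simpa using hno'
        rw [hz]
        simp only [Option.getD_some, if_pos hW, Int.toNat_zero]
        rfl
      · simp only [if_neg hW]
        by_cases hS : loc = "S"
        · have hz : PySem.Int.ofStr? dist = some 0 := by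
            rw [hS] at hno'; simpa using hno'
          rw [hz]
          simp only [Option.getD_some, if_pos hS, Int.toNat_zero]
          rfl
        · simp only [if_neg hS]
          by_cases hN : loc = "N"
          · have hz : PySem.Int.ofStr? dist = some 0 := by
              rw [hN] at hno'; simpa using hno'
            rw [hz]
            simp only [Option.getD_some, if_pos hN, Int.toNat_zero]
            rfl
          · simp only [if_neg hN]
  · rfl

lemma foldA_noop (park : List String) (np : List (List Char)) (rows cols : Int) :
    ∀ (routes : List String) (st : Int × Int), (∀ r ∈ routes, NoopRoute r = true) →
    StartsAtS park st →
    routes.foldl (solutionStep park np rows cols) st = st := by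
  intro routes
  induction routes with
  | nil => intro st _ _; rfl
  | cons r rs ih =>
    intro st hno hse
    rw [List.foldl_cons, stepA_noop park np rows cols r (hno r (by simp)) st hse]
    exact ih st (fun x hx => hno x (by simp [hx])) hse

lemma foldB_noop (park : List String) (R C : Int) :
    ∀ (routes : List String) (st : Int × Int), (∀ r ∈ routes, NoopRoute r = true) →
    routes.foldl (solutionAltStep park R C) st = st := by
  intro routes
  induction routes with
  | nil => intro st _; rfl
  | cons r rs ih =>
    intro st hno
    rw [List.foldl_cons, stepB_noop park R C r (hno r (by simp)) st]
    exact ih st (fun x hx => hno x (by simp [hx]))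

-- one route: A's step equals B's step, and B's step preserves the invariant
lemma step_eq (park : List String) (C : Int) (hrect : Rect park C) (route : String)
    (hroute : MoverOK route = true) (st : Int × Int)
    (hinv : PosInv park park.length C st) :
    solutionStep park (park.map String.toList) park.length C st route
      = solutionAltStep park park.length C st route
    ∧ PosInv park park.length C (solutionAltStep park park.length C st route) := by
  unfold MoverOK at hroute
  rcases hsplit : PySem.Str.split? route " " with _ | parts
  · rw [hsplit] at hroute; simp at hroute
  rw [hsplit] at hroute
  rcases parts with _ | ⟨loc, _ | ⟨dist, _ | ⟨x, parts⟩⟩⟩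
  · simp at hroute
  · simp at hroute
  · have hroute' : ((!(loc == "E" || loc == "W" || loc == "S" || loc == "N")) ||
        (match PySem.Int.ofStr? dist with
         | some k => decide (0 ≤ k)
         | none => false)) = true := hroute
    obtain ⟨r, c⟩ := st
    unfold solutionStep solutionAltStep
    rw [hsplit]
    dsimp only
    unfold altDirs
    by_cases hE : loc = "E"
    · have hint : (match PySem.Int.ofStr? dist with
          | some k => decide (0 ≤ k)
          | none => false) = true := by rw [hE] at hroute'; simpa using hroute'
      rcases hnv : PySem.Int.ofStr? dist with _ | nv
      · rw [hnv] at hint; simp at hint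
      rw [hnv] at hint
      have hnv0 : 0 ≤ nv := of_decide_eq_true hint
      simp only [Option.getD_some, if_pos hE]
      rcases hinv with hmi | hgd
      · have h1 : r = -1 := congrArg Prod.fst hmi
        have h2 : c = -1 := congrArg Prod.snd hmi
        subst h1; subst h2
        refine ⟨?_, ?_⟩
        · rw [if_pos (by intro hcon; omega)]
          exact (walk_from_minus1 park C 0 1 (Or.inl rfl) _).symm
        · rw [walk_from_minus1 park C 0 1 (Or.inl rfl) _]; exact Or.inl rfl
      · refine ⟨(horiz_case park C hrect r c nv 1 nv.toNat _ hgd (by omega) (Or.inl rfl)).1,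
          Or.inr (horiz_case park C hrect r c nv 1 nv.toNat ((r, c) : Int × Int) hgd
            (by omega) (Or.inl rfl)).2⟩
    · simp only [if_neg hE]
      by_cases hW : loc = "W"
      · have hint : (match PySem.Int.ofStr? dist with
            | some k => decide (0 ≤ k)
            | none => false) = true := by rw [hW] at hroute'; simpa using hroute'
        rcases hnv : PySem.Int.ofStr? dist with _ | nv
        · rw [hnv] at hint; simp at hint
        rw [hnv] at hint
        have hnv0 : 0 ≤ nv := of_decide_eq_true hint
        simp only [Option.getD_some, if_pos hW]
        rcases hinv with hmi | hgd
        · have h1 : r = -1 := congrArg Prod.fst hmi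
          have h2 : c = -1 := congrArg Prod.snd hmi
          subst h1; subst h2
          refine ⟨?_, ?_⟩
          · rw [if_pos (by intro hcon; omega)]
            exact (walk_from_minus1 park C 0 (-1) (Or.inl rfl) _).symm
          · rw [walk_from_minus1 park C 0 (-1) (Or.inl rfl) _]; exact Or.inl rfl
        · refine ⟨(horiz_case park C hrect r c (-nv) (-1) nv.toNat _ hgd (by omega)
              (Or.inr rfl)).1,
            Or.inr (horiz_case park C hrect r c (-nv) (-1) nv.toNat ((r, c) : Int × Int) hgd
              (by omega) (Or.inr rfl)).2⟩
      · simp only [if_neg hW]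
        by_cases hS : loc = "S"
        · have hint : (match PySem.Int.ofStr? dist with
              | some k => decide (0 ≤ k)
              | none => false) = true := by rw [hS] at hroute'; simpa using hroute'
          rcases hnv : PySem.Int.ofStr? dist with _ | nv
          · rw [hnv] at hint; simp at hint
          rw [hnv] at hint
          have hnv0 : 0 ≤ nv := of_decide_eq_true hint
          simp only [Option.getD_some, if_pos hS]
          rcases hinv with hmi | hgd
          · have h1 : r = -1 := congrArg Prod.fst hmi
            have h2 : c = -1 := congrArg Prod.snd hmi
            subst h1; subst h2
            refine ⟨?_, ?_⟩
            · rw [if_pos (by intro hcon; omega)]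
              exact (walk_from_minus1 park C 1 0 (Or.inr rfl) _).symm
            · rw [walk_from_minus1 park C 1 0 (Or.inr rfl) _]; exact Or.inl rfl
          · by_cases hz : nv = 0
            · subst hz
              simp only [Int.toNat_zero]
              exact ⟨zero_move park C hrect r c _ hgd, Or.inr hgd⟩
            · refine ⟨(vert_case park C r c nv 1 nv.toNat _ hgd (by omega)
                  (Or.inl rfl) hz).1,
                Or.inr (vert_case park C r c nv 1 nv.toNat ((r, c) : Int × Int) hgd
                  (by omega) (Or.inl rfl) hz).2⟩
        · simp only [if_neg hS]
          by_cases hN : loc = "N"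
          · have hint : (match PySem.Int.ofStr? dist with
                | some k => decide (0 ≤ k)
                | none => false) = true := by rw [hN] at hroute'; simpa using hroute'
            rcases hnv : PySem.Int.ofStr? dist with _ | nv
            · rw [hnv] at hint; simp at hint
            rw [hnv] at hint
            have hnv0 : 0 ≤ nv := of_decide_eq_true hint
            simp only [Option.getD_some, if_pos hN]
            rcases hinv with hmi | hgd
            · have h1 : r = -1 := congrArg Prod.fst hmi
              have h2 : c = -1 := congrArg Prod.snd hmi
              subst h1; subst h2
              refine ⟨?_, ?_⟩
              · rw [if_pos (by intro hcon; omega)]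
                exact (walk_from_minus1 park C (-1) 0 (Or.inr rfl) _).symm
              · rw [walk_from_minus1 park C (-1) 0 (Or.inr rfl) _]; exact Or.inl rfl
            · by_cases hz : nv = 0
              · subst hz
                simp only [Int.toNat_zero, neg_zero]
                exact ⟨zero_move park C hrect r c _ hgd, Or.inr hgd⟩
              · refine ⟨(vert_case park C r c (-nv) (-1) nv.toNat _ hgd (by omega)
                    (Or.inr rfl) (by omega : (-nv : Int) ≠ 0)).1,
                  Or.inr (vert_case park C r c (-nv) (-1) nv.toNat ((r, c) : Int × Int) hgd
                    (by omega) (Or.inr rfl) (by omega : (-nv : Int) ≠ 0)).2⟩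
          · -- unknown direction: A moves by (0, 0) and stays put, B skips the route
            simp only [if_neg hN]
            rcases hinv with hmi | hgd
            · have h1 : r = -1 := congrArg Prod.fst hmi
              have h2 : c = -1 := congrArg Prod.snd hmi
              subst h1; subst h2
              exact ⟨by rw [if_pos (by intro hcon; omega)], Or.inl rfl⟩
            · exact ⟨zero_move park C hrect r c _ hgd, Or.inr hgd⟩
  · simp at hroute

lemma fold_eq (park : List String) (C : Int) (hrect : Rect park C) :
    ∀ (routes : List String) (st : Int × Int), (∀ r ∈ routes, MoverOK r = true) →
    PosInv park park.length C st →
    routes.foldl (solutionStep park (park.map String.toList) park.length C) st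
      = routes.foldl (solutionAltStep park park.length C) st := by
  intro routes
  induction routes with
  | nil => intro st _ _; rfl
  | cons r rs ih =>
    intro st hok hinv
    have h := step_eq park C hrect r (hok r (by simp)) st hinv
    simp only [List.foldl_cons, h.1]
    exact ih _ (fun x hx => hok x (by simp [hx])) h.2

-- ===== VERDICT  (by name: the statement is the Claim_ definition above) =====
theorem solution_spec : Claim_equal_solution := by
  intro park routes hdom hpre
  obtain ⟨hne, hroutes, hshape⟩ := hpre
  obtain ⟨h, t, rfl⟩ : ∃ h t, park = h :: t := by
    cases park with
    | nil => exact absurd rfl hne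
    | cons h t => exact ⟨h, t, rfl⟩
  unfold Spec_solution
  simp only [solution, solution_alt, scan_eq]
  have e1 : ((h :: t).map String.toList).length = (h :: t).length := by simp
  have e2 : (PySem.List.pyGetD ((h :: t).map String.toList) 0 []) = h.toList := by
    have : ((0 : Nat) : Int) = (0 : Int) := rfl
    rw [← this, PySem.List.pyGetD_natCast]; rfl
  have e3 : (PySem.List.pyGetD (h :: t) 0 "") = h := by
    have : ((0 : Nat) : Int) = (0 : Int) := rfl
    rw [← this, PySem.List.pyGetD_natCast]; rfl
  rw [e1, e2, e3]
  rcases hshape with heqlen | hnoop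
  · have hrect : Rect (h :: t) ((h.toList.length : Int)) :=
      rect_of_eqlen _ _ (fun s hs => by
        have := heqlen s hs
        simp only [List.headD_cons] at this
        exact_mod_cast this)
    rw [fold_eq (h :: t) ((h.toList.length : Int)) hrect routes _ hroutes
      (findS_inv ((h.toList.length : Int)) (h :: t) hrect)]
  · rw [foldA_noop (h :: t) _ _ _ routes _ hnoop (findS_start (h :: t)),
      foldB_noop (h :: t) _ _ routes _ hnoop]
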